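-- pv_equiv track=rewrite | github.com/KlemensBarfus/WRF | WRF_read_write_namelist.py | namelist_input_formatting
-- ===== SOURCE A (Python) =====
-- def namelist_input_formatting(key):
--   # used to generate a nice fornmatting of several keys defined in "t"
--   # result is padded by blanks up to the length of the longest key in each
--   # inner list
--   # written by K.Barfus 4/2022
--   t = [
--     ["run_days", "run_hours", "run_minutes", "run_seconds", "aaaaaaaaaaaaaaaaaaaaaaa"],
--     ["interval_seconds", "input_from_file", "history_interval", "history_outname", "frames_per_outfile", "restart",
--      "restart_interval", "rst_outname", "io_form_history", "io_form_restart", "io_form_input", "io_form_boundary", "debug_level", "write_hist_at_0h_rst", "aaaaaaaaaaaaaaaaaaaaaaa"],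
--     ["time_step", "time_step_fract_num", "time_step_fract_den", "max_dom", "e_we", "e_sn", "e_vert", "p_top_requested", "num_metgrid_levels", "num_metgrid_soil_levels",
--      "dx", "dy", "grid_id", "parent_id", "i_parent_start", "j_parent_start", "parent_grid_ratio", "parent_time_step_ratio", "feedback", "smooth_option", "aaaaaaaaaaaaaaaaaaaaaaa"],
--     ["mp_physics", "ra_lw_physics", "ra_sw_physics", "radt", "sf_sfclay_physics", "sf_surface_physics", "bl_pbl_physics", "bldt", "cu_physics", "cudt", "isfflx", "ifsnow", "icloud",
--      "surface_input_source", "num_soil_layers", "sf_urban_physics", "aaaaaaaaaaaaaaaaaaaaaaa"],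
--     ["w_damping", "diff_opt", "km_opt", "diff_6th_opt", "diff_6th_factor", "base_temp", "damp_opt", "zdamp", "dampcoef", "khdif", "kvdif", "non_hydrostatic", "moist_adv_opt",
--      "scalar_adv_opt", "aaaaaaaaaaaaaaaaaaaaaaa"],
--     ["spec_bdy_width", "spec_zone", "relax_zone", "specified", "nested", "aaaaaaaaaaaaaaaaaaaaaaa"],
--     ["nio_tasks_per_group", "nio_groups", "aaaaaaaaaaaaaaaaaaaaaaa"]
--   ]
--   i = 0
--   found = False
--   res_string = key
--   while(found == False and i < len(t)):
--     if(key in t[i]):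
--       found = True
--       max_length = 0
--       for tt in t[i]:
--         if(len(tt) > max_length):
--           max_length = len(tt)
--       res_string = key.ljust(max_length)
--     else:
--       i = i + 1
--   return res_string
-- ===== SOURCE B (Python) =====
-- def namelist_input_formatting(key):
--   # Groups stored as space-joined strings; one pass builds a first-occurrence-wins
--   # dict from each word to its group's max word length, then a single ljust lookup
--   # (missing keys pad to their own length, i.e. stay unchanged).
--   groups = [
--     "run_days run_hours run_minutes run_seconds aaaaaaaaaaaaaaaaaaaaaaa",
--     "interval_seconds input_from_file history_interval history_outname frames_per_outfile restart restart_interval rst_outname io_form_history io_form_restart io_form_input io_form_boundary debug_level write_hist_at_0h_rst aaaaaaaaaaaaaaaaaaaaaaa",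
--     "time_step time_step_fract_num time_step_fract_den max_dom e_we e_sn e_vert p_top_requested num_metgrid_levels num_metgrid_soil_levels dx dy grid_id parent_id i_parent_start j_parent_start parent_grid_ratio parent_time_step_ratio feedback smooth_option aaaaaaaaaaaaaaaaaaaaaaa",
--     "mp_physics ra_lw_physics ra_sw_physics radt sf_sfclay_physics sf_surface_physics bl_pbl_physics bldt cu_physics cudt isfflx ifsnow icloud surface_input_source num_soil_layers sf_urban_physics aaaaaaaaaaaaaaaaaaaaaaa",
--     "w_damping diff_opt km_opt diff_6th_opt diff_6th_factor base_temp damp_opt zdamp dampcoef khdif kvdif non_hydrostatic moist_adv_opt scalar_adv_opt aaaaaaaaaaaaaaaaaaaaaaa",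
--     "spec_bdy_width spec_zone relax_zone specified nested aaaaaaaaaaaaaaaaaaaaaaa",
--     "nio_tasks_per_group nio_groups aaaaaaaaaaaaaaaaaaaaaaa",
--   ]
--   pad = {}
--   for g in groups:
--     words = g.split()
--     m = max(map(len, words))
--     for w in words:
--       pad.setdefault(w, m)
--   return key.ljust(pad.get(key, len(key)))
-- ===== Notes on version B (the rewrite author's own statement) =====
-- stated objective: simpler
-- what changed: Stores the groups as space-joined strings and replaces A's while-scan over a nested table (with an inner running-max loop per hit) by one first-occurrence-wins dict (setdefault) from each split()-word to its group's max length, built once, followed by a single ljust lookup with default len(key).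
import Mathlib
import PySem

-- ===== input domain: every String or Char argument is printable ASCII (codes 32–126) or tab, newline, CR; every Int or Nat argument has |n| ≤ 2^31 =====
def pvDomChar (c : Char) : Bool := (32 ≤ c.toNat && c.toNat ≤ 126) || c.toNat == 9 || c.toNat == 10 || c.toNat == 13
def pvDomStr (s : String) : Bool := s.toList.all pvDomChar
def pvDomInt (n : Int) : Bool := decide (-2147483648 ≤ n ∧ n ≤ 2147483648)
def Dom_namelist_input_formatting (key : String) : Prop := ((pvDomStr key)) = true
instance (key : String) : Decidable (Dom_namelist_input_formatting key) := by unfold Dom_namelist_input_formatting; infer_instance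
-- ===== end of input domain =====

-- B stores the groups as space-joined strings and replaces A's while-scan (with an inner
-- running-max loop per hit) by one first-occurrence-wins dict from each word to its group's
-- max length, built once via split(), then a single ljust lookup; objective: simpler.

-- shared: str.ljust(w) hand-ported (PySem has no ljust): exact — pad on the right with
-- spaces up to width w, unchanged when w ≤ len(s)
def pvLjust (s : String) (w : Int) : String :=
  String.ofList (s.toList ++ List.replicate (w - PySem.Str.len s).toNat ' ')

-- ===== PORT A =====
-- A's literal nested table `t`
def pvT : List (List String) := [
    ["run_days", "run_hours", "run_minutes", "run_seconds", "aaaaaaaaaaaaaaaaaaaaaaa"],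
    ["interval_seconds", "input_from_file", "history_interval", "history_outname", "frames_per_outfile", "restart", "restart_interval", "rst_outname", "io_form_history", "io_form_restart", "io_form_input", "io_form_boundary", "debug_level", "write_hist_at_0h_rst", "aaaaaaaaaaaaaaaaaaaaaaa"],
    ["time_step", "time_step_fract_num", "time_step_fract_den", "max_dom", "e_we", "e_sn", "e_vert", "p_top_requested", "num_metgrid_levels", "num_metgrid_soil_levels", "dx", "dy", "grid_id", "parent_id", "i_parent_start", "j_parent_start", "parent_grid_ratio", "parent_time_step_ratio", "feedback", "smooth_option", "aaaaaaaaaaaaaaaaaaaaaaa"],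
    ["mp_physics", "ra_lw_physics", "ra_sw_physics", "radt", "sf_sfclay_physics", "sf_surface_physics", "bl_pbl_physics", "bldt", "cu_physics", "cudt", "isfflx", "ifsnow", "icloud", "surface_input_source", "num_soil_layers", "sf_urban_physics", "aaaaaaaaaaaaaaaaaaaaaaa"],
    ["w_damping", "diff_opt", "km_opt", "diff_6th_opt", "diff_6th_factor", "base_temp", "damp_opt", "zdamp", "dampcoef", "khdif", "kvdif", "non_hydrostatic", "moist_adv_opt", "scalar_adv_opt", "aaaaaaaaaaaaaaaaaaaaaaa"],
    ["spec_bdy_width", "spec_zone", "relax_zone", "specified", "nested", "aaaaaaaaaaaaaaaaaaaaaaa"],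
    ["nio_tasks_per_group", "nio_groups", "aaaaaaaaaaaaaaaaaaaaaaa"]
  ]

-- inner 'for tt in t[i]' running-max loop of A
def pvMaxLoopA (g : List String) : Int :=
  g.foldl (fun max_length tt => if PySem.Str.len tt > max_length then PySem.Str.len tt else max_length) 0

-- A's while loop: advance i until `key in t[i]`; on a hit set res_string and stop
def pvWhileA : List (List String) → String → String
  | [], key => key
  | g :: rest, key => if g.contains key then pvLjust key (pvMaxLoopA g) else pvWhileA rest key

def namelist_input_formatting (key : String) : String := pvWhileA pvT key

-- ===== PORT B =====
-- B's literal `groups`: each group is one space-joined string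
def pvGroupsB : List String := [
    "run_days run_hours run_minutes run_seconds aaaaaaaaaaaaaaaaaaaaaaa",
    "interval_seconds input_from_file history_interval history_outname frames_per_outfile restart restart_interval rst_outname io_form_history io_form_restart io_form_input io_form_boundary debug_level write_hist_at_0h_rst aaaaaaaaaaaaaaaaaaaaaaa",
    "time_step time_step_fract_num time_step_fract_den max_dom e_we e_sn e_vert p_top_requested num_metgrid_levels num_metgrid_soil_levels dx dy grid_id parent_id i_parent_start j_parent_start parent_grid_ratio parent_time_step_ratio feedback smooth_option aaaaaaaaaaaaaaaaaaaaaaa",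
    "mp_physics ra_lw_physics ra_sw_physics radt sf_sfclay_physics sf_surface_physics bl_pbl_physics bldt cu_physics cudt isfflx ifsnow icloud surface_input_source num_soil_layers sf_urban_physics aaaaaaaaaaaaaaaaaaaaaaa",
    "w_damping diff_opt km_opt diff_6th_opt diff_6th_factor base_temp damp_opt zdamp dampcoef khdif kvdif non_hydrostatic moist_adv_opt scalar_adv_opt aaaaaaaaaaaaaaaaaaaaaaa",
    "spec_bdy_width spec_zone relax_zone specified nested aaaaaaaaaaaaaaaaaaaaaaa",
    "nio_tasks_per_group nio_groups aaaaaaaaaaaaaaaaaaaaaaa"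
  ]

-- B's one-pass dict build: for g in groups: words = g.split(); m = max(map(len, words));
-- for w in words: pad.setdefault(w, m).  (max(...) raises only on an empty sequence, which
-- no literal group is; its port is maxD with an unreachable default 0)
def pvPadDictB : PySem.Dict String Int :=
  pvGroupsB.foldl
    (fun pad g =>
      let words := PySem.Str.split₀ g
      let m := PySem.List.maxD (words.map PySem.Str.len) (fun x => x) 0
      words.foldl (fun pad w => pad.setdefault w m) pad)
    PySem.Dict.empty

-- key.ljust(pad.get(key, len(key)))
def namelist_input_formatting_alt (key : String) : String :=
  pvLjust key (pvPadDictB.getD key (PySem.Str.len key))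

-- ===== PRECONDITION & SPEC =====
def Spec_namelist_input_formatting (key : String) (out : String) : Prop := out = namelist_input_formatting_alt key
instance (key : String) (out : String) : Decidable (Spec_namelist_input_formatting key out) := by unfold Spec_namelist_input_formatting; infer_instance

-- ===== CLAIM (what is proved, stated in full; the proofs are below) =====
def Claim_equal_namelist_input_formatting : Prop := ∀ (key : String), Dom_namelist_input_formatting key → Spec_namelist_input_formatting key (namelist_input_formatting key)

-- ===== LEMMAS AND PROOFS =====

-- B's space-joined groups split back to exactly A's table
set_option maxRecDepth 20000 in
set_option maxHeartbeats 2000000 in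
theorem pvSplit_groups : pvGroupsB.map PySem.Str.split₀ = pvT := by decide

-- the width the first group containing `key` assigns (A's search order), as an Option
def pvFirstWidth (key : String) : List (List String) → Option Int
  | [] => none
  | g :: rest => if g.contains key then some (pvMaxLoopA g) else pvFirstWidth key rest

theorem pvLjust_len (s : String) : pvLjust s (PySem.Str.len s) = s := by
  simp [pvLjust, PySem.Str.len_eq]

theorem pvWhileA_eq_firstWidth (key : String) (gs : List (List String)) :
    pvWhileA gs key = pvLjust key ((pvFirstWidth key gs).getD (PySem.Str.len key)) := by
  induction gs with
  | nil => simp only [pvWhileA, pvFirstWidth, Option.getD_none, pvLjust_len]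
  | cons g rest ih =>
      by_cases h : key ∈ g
      · simp [pvWhileA, pvFirstWidth, h]
      · simp [pvWhileA, pvFirstWidth, h, ih]

-- B's max(map(len, words)) equals A's running-max loop
theorem pvMax_eq (g : List String) :
    PySem.List.maxD (g.map PySem.Str.len) (fun x => x) 0 = pvMaxLoopA g := by
  have hcong : ∀ (l : List Int) (a : Int),
      l.foldl (fun m x => if x > m then x else m) a = l.foldl max a := by
    intro l a
    exact PySem.List.foldl_congr_mem l _ _ a (fun acc x _ => by rw [max_def]; split_ifs <;> omega)
  cases g with
  | nil => simp [PySem.List.maxD, PySem.List.max?, pvMaxLoopA]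
  | cons x t =>
      have hmax : PySem.List.max? ((x :: t).map PySem.Str.len) (fun y => y)
          = some ((t.map PySem.Str.len).foldl max (PySem.Str.len x)) := by
        simpa using PySem.List.max?_id_cons (PySem.Str.len x) (t.map PySem.Str.len)
      have hx : (if PySem.Str.len x > 0 then PySem.Str.len x else (0 : Int)) = PySem.Str.len x := by
        have : (0 : Int) ≤ PySem.Str.len x := by simp [PySem.Str.len_eq]
        split_ifs <;> omega
      have hA : pvMaxLoopA (x :: t)
          = (t.map PySem.Str.len).foldl (fun m y => if y > m then y else m) (PySem.Str.len x) := by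
        simp only [pvMaxLoopA, List.foldl_cons, hx, List.foldl_map]
      simp only [PySem.List.maxD, hmax, Option.getD_some, hA, hcong]

-- one group of B's build: setdefault keeps earlier entries, adds the group's width for its members
theorem pvGroup_get? (g : List String) (m : Int) (d : PySem.Dict String Int) (key : String) :
    (g.foldl (fun pad w => pad.setdefault w m) d).get? key
      = (d.get? key).or (if g.contains key then some m else none) := by
  induction g generalizing d with
  | nil => simp
  | cons k r ih =>
      simp only [List.foldl_cons, ih]
      by_cases hk : key = k
      · subst hk
        rw [PySem.Dict.get?_setdefault_self]
        cases hd : d.get? key <;> simp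
      · rw [PySem.Dict.get?_setdefault_of_ne d m hk]
        simp [hk]

-- the whole build over any word-list table: the dict's answer is the first group's width
theorem pvBuild_get? (gs : List (List String)) (d : PySem.Dict String Int) (key : String) :
    (gs.foldl
        (fun pad words =>
          let m := PySem.List.maxD (words.map PySem.Str.len) (fun x => x) 0
          words.foldl (fun pad w => pad.setdefault w m) pad)
        d).get? key
      = (d.get? key).or (pvFirstWidth key gs) := by
  induction gs generalizing d with
  | nil => simp [pvFirstWidth]
  | cons g rest ih =>
      rw [List.foldl_cons, ih, pvGroup_get?, Option.or_assoc, pvMax_eq]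
      congr 1
      by_cases h : key ∈ g <;> simp [pvFirstWidth, h]

-- B's dict build over the joined strings = the generic build over pvT (fold over the split images)
theorem pvPadDictB_get? (key : String) :
    pvPadDictB.get? key = pvFirstWidth key pvT := by
  have hfold : pvPadDictB
      = (pvGroupsB.map PySem.Str.split₀).foldl
          (fun pad words =>
            let m := PySem.List.maxD (words.map PySem.Str.len) (fun x => x) 0
            words.foldl (fun pad w => pad.setdefault w m) pad)
          PySem.Dict.empty := by
    simp [pvPadDictB, List.foldl_map]
  rw [hfold, pvSplit_groups, pvBuild_get?, PySem.Dict.get?_empty, Option.none_or]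

-- ===== VERDICT (by name: the statement is the Claim_ definition above) =====
theorem namelist_input_formatting_spec : Claim_equal_namelist_input_formatting := by
  intro key _
  unfold Spec_namelist_input_formatting
  rw [namelist_input_formatting, pvWhileA_eq_firstWidth, namelist_input_formatting_alt,
    PySem.Dict.getD_eq_get?_getD, pvPadDictB_get?]
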